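-- pv_equiv track=rewrite | github.com/SSH1007/Algorithm | 프로그래머스/1/160586. 대충 만든 자판/대충 만든 자판.py | solution
-- ===== SOURCE A (Python) =====
-- def solution(keymap, targets):
--     answer = []
--     dic = dict()
--
--     for key in keymap:
--         for idx, k in enumerate(key):
--             if k in dic and idx > dic[k]:
--                 continue
--             dic[k] = idx
--
--
--     for tar in targets:
--         tmp = 0
--         for t in tar:
--             if t not in dic:
--                 tmp = -1
--                 break
--             else:
--                 tmp += (dic[t]+1)
--         answer.append(tmp)
--     return answer
-- ===== SOURCE B (Python) =====
-- def first_pos(key, t):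
--     for i, k in enumerate(key):
--         if k == t:
--             return i
--     return None
--
--
-- def solution(keymap, targets):
--     answer = []
--     for tar in targets:
--         total = 0
--         for t in tar:
--             best = None
--             for key in keymap:
--                 i = first_pos(key, t)
--                 if i is not None and (best is None or i < best):
--                     best = i
--             if best is None:
--                 total = -1
--                 break
--             total += best + 1
--         answer.append(total)
--     return answer
-- ===== Notes on version B (the rewrite author's own statement) =====
-- stated objective: alternative
-- what changed: Drops A's precomputed char->min-index dict; B scans every keymap row per target character, taking the minimum first-occurrence index across rows on the fly.
import Mathlib
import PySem

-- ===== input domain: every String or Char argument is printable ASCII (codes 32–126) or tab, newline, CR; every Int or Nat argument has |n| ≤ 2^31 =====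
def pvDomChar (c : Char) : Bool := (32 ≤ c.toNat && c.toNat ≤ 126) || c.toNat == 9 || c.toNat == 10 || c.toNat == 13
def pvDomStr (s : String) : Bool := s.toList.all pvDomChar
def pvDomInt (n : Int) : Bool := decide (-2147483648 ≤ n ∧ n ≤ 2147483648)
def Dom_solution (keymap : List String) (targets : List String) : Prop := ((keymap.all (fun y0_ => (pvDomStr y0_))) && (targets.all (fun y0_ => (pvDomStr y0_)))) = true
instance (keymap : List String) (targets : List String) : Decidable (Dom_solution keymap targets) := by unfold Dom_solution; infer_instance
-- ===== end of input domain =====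

-- B replaces A's precomputed char→min-index dict by a per-character scan of every keymap row (alternative decomposition, no speed claim).

-- ===== PORT A =====
-- inner loop over one keymap row: for idx, k in enumerate(key): if k in dic and idx > dic[k]: continue; dic[k] = idx
def solA_row (d : PySem.Dict Char Int) (key : String) : PySem.Dict Char Int :=
  (PySem.List.enumerate key.toList).foldl
    (fun d p =>
      match d.get? p.2 with
      | some v => if p.1 > v then d else d.insert p.2 p.1
      | none => d.insert p.2 p.1) d

-- inner loop over one target: tmp accumulator with break on a missing character
def solA_tar (dic : PySem.Dict Char Int) : List Char → Int → Int
  | [], tmp => tmp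
  | t :: rest, tmp =>
    match dic.get? t with
    | none => -1
    | some v => solA_tar dic rest (tmp + (v + 1))

def solution (keymap : List String) (targets : List String) : List Int :=
  let dic := keymap.foldl solA_row PySem.Dict.empty
  targets.foldl (fun answer tar => answer ++ [solA_tar dic tar.toList 0]) []

-- ===== PORT B =====
-- first_pos(key, t): index accumulator plays enumerate's role
def firstPos (t : Char) : List Char → Int → Option Int
  | [], _ => none
  | k :: rest, i => if k = t then some i else firstPos t rest (i + 1)

-- for key in keymap: i = first_pos(key, t); if i is not None and (best is None or i < best): best = i
def solB_best (t : Char) : List String → Option Int → Option Int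
  | [], best => best
  | key :: rest, best =>
    let i := firstPos t key.toList 0
    solB_best t rest
      (match i, best with
       | some i, none => some i
       | some i, some b => if i < b then some i else some b
       | none, best => best)

-- for t in tar: with break on best = None
def solB_tar (keymap : List String) : List Char → Int → Int
  | [], total => total
  | t :: rest, total =>
    match solB_best t keymap none with
    | none => -1
    | some b => solB_tar keymap rest (total + (b + 1))

def solution_alt (keymap : List String) (targets : List String) : List Int :=
  targets.foldl (fun answer tar => answer ++ [solB_tar keymap tar.toList 0]) []

-- ===== PRECONDITION & SPEC =====
def Spec_solution (keymap : List String) (targets : List String) (out : List Int) : Prop := out = solution_alt keymap targets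
instance (keymap : List String) (targets : List String) (out : List Int) : Decidable (Spec_solution keymap targets out) := by unfold Spec_solution; infer_instance

-- ===== CLAIM (what is proved, stated in full; the proofs are below) =====
def Claim_equal_solution : Prop := ∀ (keymap : List String) (targets : List String), Dom_solution keymap targets → Spec_solution keymap targets (solution keymap targets)

-- ===== LEMMAS AND PROOFS =====

-- B's per-row combine step, abstracted
def combineB (best : Option Int) (i : Option Int) : Option Int :=
  match i, best with
  | some i, none => some i
  | some i, some b => if i < b then some i else some b
  | none, best => best

theorem firstPos_ge (t : Char) : ∀ (chars : List Char) (s j : Int), firstPos t chars s = some j → s ≤ j := by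
  intro chars
  induction chars with
  | nil => intro s j h; simp [firstPos] at h
  | cons k rest ih =>
    intro s j h
    simp only [firstPos] at h
    split at h
    · simp at h; omega
    · have := ih (s + 1) j h; omega

theorem solA_row_get (t : Char) (chars : List Char) :
    ∀ (d : PySem.Dict Char Int) (s : Int),
      ((PySem.List.enumerate chars s).foldl
        (fun d (p : Int × Char) =>
          match d.get? p.2 with
          | some v => if p.1 > v then d else d.insert p.2 p.1
          | none => d.insert p.2 p.1) d).get? t
      = combineB (d.get? t) (firstPos t chars s) := by
  induction chars with
  | nil => intro d s; simp [PySem.List.enumerate_nil, firstPos, combineB]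
  | cons k rest ih =>
    intro d s
    rw [PySem.List.enumerate_cons]
    simp only [List.foldl_cons, firstPos]
    by_cases hk : k = t
    · subst hk
      -- the new binding for k is s (or the old smaller value), and every later
      -- occurrence found by firstPos in rest has index ≥ s + 1
      have hrest : ∀ j, firstPos k rest (s + 1) = some j → s + 1 ≤ j := fun j => firstPos_ge k rest (s + 1) j
      cases hd : d.get? k with
      | none =>
        rw [ih]
        simp only [PySem.Dict.get?_insert_self]
        cases hf : firstPos k rest (s + 1) with
        | none => simp [combineB]
        | some j =>
          have := hrest j hf
          simp [combineB]
          omega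
      | some v =>
        have hinit : (match (some v : Option Int) with
            | some v => if s > v then d else d.insert k s
            | none => d.insert k s) = if s > v then d else d.insert k s := rfl
        rw [hinit]
        by_cases hv : s > v
        · rw [if_pos hv, ih, hd]
          cases hf : firstPos k rest (s + 1) with
          | none => simp [combineB]; omega
          | some j =>
            have := hrest j hf
            simp only [combineB]
            rw [if_neg (by omega : ¬ j < v)]
            simp only [if_true]
            show some v = if s < v then some s else some v
            rw [if_neg (by omega : ¬ s < v)]
        · rw [if_neg hv, ih]
          simp only [PySem.Dict.get?_insert_self]
          cases hf : firstPos k rest (s + 1) with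
          | none => simp [combineB]; omega
          | some j =>
            have := hrest j hf
            simp only [combineB]
            rw [if_neg (by omega : ¬ j < s)]
            simp only [if_true]
            show some s = if s < v then some s else some v
            by_cases h : s < v
            · rw [if_pos h]
            · rw [if_neg h, show s = v by omega]
    · -- k ≠ t: the dict entry for t is untouched by this step
      have hstep : ∀ (d' : PySem.Dict Char Int),
          ((match d'.get? k with
            | some v => if s > v then d' else d'.insert k s
            | none => d'.insert k s) : PySem.Dict Char Int).get? t = d'.get? t := by
        intro d'
        have hne : t ≠ k := fun he => hk he.symm
        cases hdk : d'.get? k with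
        | none => simp [PySem.Dict.get?_insert_of_ne _ _ hne]
        | some v =>
          by_cases hv : s > v
          · simp [hv]
          · simp [hv, PySem.Dict.get?_insert_of_ne _ _ hne]
      rw [ih, hstep, if_neg hk]

theorem dict_eq_best (t : Char) (keymap : List String) :
    ∀ (d : PySem.Dict Char Int),
      (keymap.foldl solA_row d).get? t = solB_best t keymap (d.get? t) := by
  induction keymap with
  | nil => intro d; simp [solB_best]
  | cons key rest ih =>
    intro d
    simp only [List.foldl_cons, solB_best]
    rw [ih]
    show solB_best t rest ((solA_row d key).get? t) = _
    unfold solA_row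
    rw [solA_row_get]
    rfl

theorem tar_eq (keymap : List String) (chars : List Char) :
    ∀ (tmp : Int),
      solA_tar (keymap.foldl solA_row PySem.Dict.empty) chars tmp = solB_tar keymap chars tmp := by
  induction chars with
  | nil => intro tmp; rfl
  | cons t rest ih =>
    intro tmp
    simp only [solA_tar, solB_tar]
    rw [dict_eq_best]
    have hempty : (PySem.Dict.empty : PySem.Dict Char Int).get? t = none := by
      simp [PySem.Dict.empty, PySem.Dict.get?]
    rw [hempty]
    cases solB_best t keymap none with
    | none => rfl
    | some b => exact ih (tmp + (b + 1))

-- ===== VERDICT (by name: the statement is the Claim_ definition above) =====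
theorem solution_spec : Claim_equal_solution := by
  intro keymap targets _
  unfold Spec_solution solution solution_alt
  have hfun : (fun (answer : List Int) (tar : String) =>
      answer ++ [solA_tar (keymap.foldl solA_row PySem.Dict.empty) tar.toList 0])
      = fun answer tar => answer ++ [solB_tar keymap tar.toList 0] := by
    funext answer tar
    rw [tar_eq]
  simp only [hfun]
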